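-- pv_equiv track=rewrite | github.com/serafinmoral/tablasat | comunes.py | numeroalgunafalsa
-- ===== SOURCE A (Python) =====
-- def numeroalgunafalsa (lclau,n):
--
--     k = len(lclau)
--
--
--
--     if (k == 1):
--         return 2**(n-len(lclau[0]))
--
--     if(k==0):
--         return 0
--
--     nlista = lclau.copy()
--     clau = nlista.pop()
--
--
--
--     p1 = numeroalgunafalsa(nlista,n)
--
--
--
--
--
--     p3= numfalsayalguna(clau,nlista,n)
--
--     return p1 + 2**(n-len(clau)) -p3
--
-- def numfalsayalguna(clau,lclau,n):
--
--     negclau = set(map(lambda x: -x,clau))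
--     nlc = []
--     for x in lclau:
--         if (len(x.intersection(negclau)) == 0):
--             y = frozenset(x-clau)
--             nlc.append(y)
--
--     return numeroalgunafalsa(nlc,n-len(clau))
-- ===== SOURCE B (Python) =====
-- def numeroalgunafalsa(lclau, n):
--     # Inclusion-exclusion over all nonempty subsets of the clause list:
--     # a subset with no cross-clause complementary pair contributes
--     # (-1)**(|S|+1) * 2**(n - |union of its literals|); others contribute 0.
--     subs = [[]]
--     for c in lclau:
--         subs = subs + [s + [c] for s in subs]
--     total = 0
--     for s in subs:
--         if not s:
--             continue
--         ok = True
--         for i in range(len(s)):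
--             for j in range(i + 1, len(s)):
--                 if any(-l in s[j] for l in s[i]):
--                     ok = False
--         if ok:
--             u = set()
--             for c in s:
--                 u |= set(c)
--             total += (-1) ** (len(s) + 1) * 2 ** (n - len(u))
--     return total
-- ===== Notes on version B (the rewrite author's own statement) =====
-- stated objective: alternative
-- what changed: A's recursive peel-the-last-clause inclusion-exclusion (mutual recursion with a projection helper) is replaced by a single flat pass that enumerates all nonempty subsets of the clause list once and sums (-1)**(|S|+1) * 2**(n - |union of S's literals|) over the pairwise non-conflicting subsets.
-- outside the precondition, e.g. on numeroalgunafalsa([{1, 2}], 1): A returns 0.5, B returns 0.5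
import Mathlib
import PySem

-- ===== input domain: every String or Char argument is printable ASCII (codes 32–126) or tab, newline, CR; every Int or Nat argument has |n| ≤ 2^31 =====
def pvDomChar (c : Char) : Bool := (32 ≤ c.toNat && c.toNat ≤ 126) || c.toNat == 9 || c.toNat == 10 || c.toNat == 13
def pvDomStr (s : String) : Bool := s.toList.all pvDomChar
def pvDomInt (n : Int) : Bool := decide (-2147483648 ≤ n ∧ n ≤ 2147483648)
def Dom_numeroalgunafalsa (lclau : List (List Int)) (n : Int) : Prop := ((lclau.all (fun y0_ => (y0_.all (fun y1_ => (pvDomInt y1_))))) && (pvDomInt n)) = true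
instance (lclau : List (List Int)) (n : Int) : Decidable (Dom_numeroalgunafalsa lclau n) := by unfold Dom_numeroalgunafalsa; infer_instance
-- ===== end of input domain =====

-- B replaces A's recursive peel-and-project inclusion–exclusion with one flat pass over all
-- nonempty subsets of the clause list (alternative decomposition, same exponential cost).
-- Both return the RETURN value only; neither mutates its arguments observably.

-- shared numeric helper: Python's 2**e; exact for 0 ≤ e (guaranteed by Pre_; for e < 0 Python
-- yields a float, and those inputs are excluded by Pre_).
def pvPow2 (e : Int) : Int := 2 ^ e.toNat

-- ===== PORT A =====
-- cited by decreasing_by of the mutual recursion below (length bound for the append-if loop)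
theorem pvFoldlAppendIfLen {α β : Type} (p : α → Prop) [DecidablePred p] (f : α → β) :
    ∀ (l : List α) (acc : List β),
      (l.foldl (fun nlc x => if _h : p x then nlc ++ [f x] else nlc) acc).length ≤ acc.length + l.length := by
  intro l
  induction l with
  | nil => intro acc; simp
  | cons x r ih =>
      intro acc
      simp only [List.foldl_cons, List.length_cons]
      by_cases h : p x
      · simpa [h] using le_trans (ih (acc ++ [f x])) (by simp; omega)
      · simpa [h] using le_trans (ih acc) (by omega)

mutual
-- literal transliteration of A's numeroalgunafalsa (clauses are Python sets: distinct elements)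
def numA (lclau : List (PySem.Set Int)) (n : Int) : Int :=
  if _h1 : lclau.length = 1 then
    pvPow2 (n - (lclau.headI.length : Int))
  else if _h0 : lclau.length = 0 then 0
  else
    let nlista := lclau.dropLast
    let clau := lclau.getLastD []
    numA nlista n + pvPow2 (n - (clau.length : Int)) - numfya clau nlista n
termination_by 2 * lclau.length
decreasing_by
  · simp [List.length_dropLast]; omega
  · simp [List.length_dropLast]; omega

-- literal transliteration of A's numfalsayalguna
def numfya (clau : PySem.Set Int) (lclau : List (PySem.Set Int)) (n : Int) : Int :=
  let negclau : PySem.Set Int := PySem.Set.ofList (clau.map (fun x => -x))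
  let nlc := lclau.foldl (fun nlc x =>
    if (PySem.Set.inter x negclau).length = 0 then nlc ++ [PySem.Set.diff x clau] else nlc) []
  numA nlc (n - (clau.length : Int))
termination_by 2 * lclau.length + 1
decreasing_by
  · have h := pvFoldlAppendIfLen
      (fun x => (PySem.Set.inter x (PySem.Set.ofList (clau.map (fun x => -x)))).length = 0)
      (fun x => PySem.Set.diff x clau) lclau []
    simp only [List.length_nil, Nat.zero_add] at h
    omega
end

def numeroalgunafalsa (lclau : List (List Int)) (n : Int) : Int :=
  numA (lclau.map (fun c => PySem.Set.ofList c)) n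

-- ===== PORT B =====
-- subs = [[]]; for c in lclau: subs = subs + [s + [c] for s in subs]
def pvSubsets (lclau : List (PySem.Set Int)) : List (List (PySem.Set Int)) :=
  lclau.foldl (fun subs c => subs ++ subs.map (fun s => s ++ [c])) [[]]

-- the i<j double loop: ok iff no clause holds a literal whose negation is in a later clause
def pvOk : List (PySem.Set Int) → Bool
  | [] => true
  | x :: r => (r.all fun y => !(x.any fun l => PySem.Set.contains y (-l))) && pvOk r

-- u = set(); for c in s: u |= set(c)
def pvUnion (s : List (PySem.Set Int)) : PySem.Set Int :=
  s.foldl (fun u c => PySem.Set.union u c) PySem.Set.empty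

def numeroalgunafalsa_alt (lclau : List (List Int)) (n : Int) : Int :=
  let cs := lclau.map (fun c => PySem.Set.ofList c)
  (pvSubsets cs).foldl (fun total s =>
    if s.isEmpty then total
    else if pvOk s then
      total + (-1 : Int) ^ (s.length + 1) * pvPow2 (n - ((pvUnion s).length : Int))
    else total) 0

-- ===== PRECONDITION & SPEC =====
-- Pre_ excludes exactly the inputs on which Python A returns a float instead of an int
-- (some evaluated exponent 2**(n - |union|) is negative): it requires every nonempty,
-- pairwise non-conflicting subset of the clause list to have at most n distinct literals.
def Pre_numeroalgunafalsa (lclau : List (List Int)) (n : Int) : Prop :=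
  ∀ s ∈ (lclau.map (fun c => c.dedup)).sublists, s ≠ [] →
    s.Pairwise (fun x y => ∀ l ∈ x, -l ∉ y) → ((s.flatten.dedup.length : Int) ≤ n)
instance (lclau : List (List Int)) (n : Int) : Decidable (Pre_numeroalgunafalsa lclau n) := by
  unfold Pre_numeroalgunafalsa; infer_instance

def pvWitness_numeroalgunafalsa : List (List Int) × Int := ([[1], [2]], 2)

def Spec_numeroalgunafalsa (lclau : List (List Int)) (n : Int) (out : Int) : Prop := out = numeroalgunafalsa_alt lclau n
instance (lclau : List (List Int)) (n : Int) (out : Int) : Decidable (Spec_numeroalgunafalsa lclau n out) := by unfold Spec_numeroalgunafalsa; infer_instance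

-- ===== CLAIM (what is proved, stated in full; the proofs are below) =====
def Claim_equal_numeroalgunafalsa : Prop := ∀ (lclau : List (List Int)) (n : Int), Dom_numeroalgunafalsa lclau n → Pre_numeroalgunafalsa lclau n → Spec_numeroalgunafalsa lclau n (numeroalgunafalsa lclau n)

-- ===== LEMMAS AND PROOFS =====

-- per-subset contribution of B's accumulation loop
def pvTerm (n : Int) (s : List (List Int)) : Int :=
  if s = [] then 0
  else if pvOk s then (-1 : Int) ^ (s.length + 1) * pvPow2 (n - ((pvUnion s).length : Int)) else 0

-- Bool form of "clause x has no literal whose negation lies in clau"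
def pvKeepB (clau x : List Int) : Bool := x.all fun l => !(clau.contains (-l))

-- the projected clause list built by numfya
def pvProj (clau : List Int) (lclau : List (List Int)) : List (List Int) :=
  (lclau.filter (pvKeepB clau)).map (fun x => PySem.Set.diff x clau)

theorem pvKeepB_iff (clau x : List Int) : pvKeepB clau x = true ↔ ∀ l ∈ x, -l ∉ clau := by
  simp [pvKeepB]

theorem pvInterLen_iff (clau x : List Int) :
    (PySem.Set.inter x (PySem.Set.ofList (clau.map (fun l => -l)))).length = 0 ↔
      ∀ l ∈ x, -l ∉ clau := by
  rw [List.length_eq_zero_iff, List.eq_nil_iff_forall_not_mem]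
  constructor
  · intro h l hl hneg
    exact h l (by
      rw [PySem.Set.mem_inter]
      exact ⟨hl, by rw [PySem.Set.mem_ofList]; exact List.mem_map.mpr ⟨-l, hneg, by ring⟩⟩)
  · intro h y hy
    rw [PySem.Set.mem_inter, PySem.Set.mem_ofList] at hy
    obtain ⟨hyx, hy2⟩ := hy
    obtain ⟨m, hm, rfl⟩ := List.mem_map.mp hy2
    exact h (-m) hyx (by simpa using hm)

theorem pvFoldlAppendIf {α β : Type} (p : α → Prop) [DecidablePred p] (f : α → β) :
    ∀ (l : List α) (acc : List β),
      l.foldl (fun nlc x => if p x then nlc ++ [f x] else nlc) acc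
        = acc ++ (l.filter (fun x => decide (p x))).map f := by
  intro l
  induction l with
  | nil => intro acc; simp
  | cons x r ih =>
      intro acc
      by_cases h : p x
      · simp [h, ih (acc ++ [f x])]
      · simp [h, ih acc]

theorem pvNumfya_eq (clau : List Int) (lclau : List (List Int)) (n : Int) :
    numfya clau lclau n = numA (pvProj clau lclau) (n - (clau.length : Int)) := by
  rw [numfya]
  congr 1
  rw [pvFoldlAppendIf
    (fun x => (PySem.Set.inter x (PySem.Set.ofList (clau.map (fun x => -x)))).length = 0)
    (fun x => PySem.Set.diff x clau) lclau []]
  simp only [List.nil_append, pvProj]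
  congr 1
  apply List.filter_congr
  intro x _
  rw [Bool.eq_iff_iff]
  simp only [decide_eq_true_eq]
  exact (pvInterLen_iff clau x).trans (pvKeepB_iff clau x).symm

theorem pvSubsets_append (M : List (List Int)) (c : List Int) :
    pvSubsets (M ++ [c]) = pvSubsets M ++ (pvSubsets M).map (fun s => s ++ [c]) := by
  simp [pvSubsets, List.foldl_append]

theorem pvSubsets_count_nil (M : List (List Int)) :
    (pvSubsets M).count ([] : List (List Int)) = 1 := by
  induction M using List.reverseRecOn with
  | nil => rfl
  | append_singleton M c ih =>
      rw [pvSubsets_append, List.count_append, ih]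
      have : ([] : List (List Int)) ∉ (pvSubsets M).map (fun s => s ++ [c]) := by
        intro h
        obtain ⟨s, _, hs⟩ := List.mem_map.mp h
        simp at hs
      rw [List.count_eq_zero.mpr this]

theorem pvSumIfNil (l : List (List (List Int))) (a : Int) :
    (l.map (fun s => if s = [] then a else 0)).sum = (l.count ([] : List (List Int)) : Int) * a := by
  induction l with
  | nil => simp
  | cons s l ih =>
      by_cases h : s = []
      · simp [h, ih]
        ring
      · simp [h, ih]

theorem pvSumMapSub (l : List (List (List Int))) (f g : List (List Int) → Int) :
    (l.map (fun s => f s - g s)).sum = (l.map f).sum - (l.map g).sum := by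
  induction l with
  | nil => simp
  | cons s l ih => simp [ih]; ring

theorem pvFoldEqSum (n : Int) :
    ∀ (l : List (List (List Int))) (t : Int),
      l.foldl (fun total s =>
        if s.isEmpty then total
        else if pvOk s then
          total + (-1 : Int) ^ (s.length + 1) * pvPow2 (n - ((pvUnion s).length : Int))
        else total) t = t + (l.map (pvTerm n)).sum := by
  intro l
  induction l with
  | nil => intro t; simp
  | cons s l ih =>
      intro t
      rw [List.foldl_cons, List.map_cons, List.sum_cons, ih]
      by_cases h : s = []
      · simp [h, pvTerm]
      · by_cases hok : pvOk s
        · simp [pvTerm, h, hok, List.isEmpty_iff]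
          ring
        · simp [pvTerm, h, hok, List.isEmpty_iff]

theorem pvUnion_mem_aux (y : Int) :
    ∀ (s : List (List Int)) (u : List Int),
      y ∈ s.foldl (fun u c => PySem.Set.union u c) u ↔ y ∈ u ∨ ∃ x ∈ s, y ∈ x := by
  intro s
  induction s with
  | nil => intro u; simp
  | cons c s ih =>
      intro u
      rw [List.foldl_cons, ih]
      rw [PySem.Set.mem_union]
      constructor
      · rintro (⟨h | h⟩ | ⟨x, hx, hy⟩)
        · exact Or.inl h
        · exact Or.inr ⟨c, by simp, h⟩
        · exact Or.inr ⟨x, by simp [hx], hy⟩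
      · rintro (h | ⟨x, hx, hy⟩)
        · exact Or.inl (Or.inl h)
        · rcases List.mem_cons.mp hx with rfl | hx
          · exact Or.inl (Or.inr hy)
          · exact Or.inr ⟨x, hx, hy⟩

theorem pvUnion_mem (s : List (List Int)) (y : Int) :
    y ∈ pvUnion s ↔ ∃ x ∈ s, y ∈ x := by
  rw [pvUnion, pvUnion_mem_aux]
  simp [PySem.Set.empty]

theorem pvUnion_nodup_aux :
    ∀ (s : List (List Int)) (u : List Int), u.Nodup →
      (s.foldl (fun u c => PySem.Set.union u c) u).Nodup := by
  intro s
  induction s with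
  | nil => intro u hu; simpa
  | cons c s ih =>
      intro u hu
      exact ih _ (PySem.Set.nodup_union u c hu)

theorem pvUnion_nodup (s : List (List Int)) : (pvUnion s).Nodup :=
  pvUnion_nodup_aux s [] List.nodup_nil

theorem pvUnion_len (s : List (List Int)) :
    (pvUnion s).length = s.flatten.toFinset.card := by
  have h1 : (pvUnion s).toFinset.card = (pvUnion s).length :=
    List.toFinset_card_of_nodup (pvUnion_nodup s)
  rw [← h1]
  congr 1
  ext y
  simp [pvUnion_mem, List.mem_flatten]

-- cross-clause conflict
def pvConf (x y : List Int) : Prop := ∃ l ∈ x, -l ∈ y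

theorem pvOk_iff (s : List (List Int)) :
    pvOk s = true ↔ s.Pairwise (fun x y => ¬ pvConf x y) := by
  induction s with
  | nil => simp [pvOk]
  | cons x r ih =>
      rw [List.pairwise_cons, ← ih]
      simp [pvOk, pvConf]

theorem pvConf_diff (c x y : List Int) (hx : ∀ l ∈ x, -l ∉ c) (hy : ∀ l ∈ y, -l ∉ c) :
    pvConf (PySem.Set.diff x c) (PySem.Set.diff y c) ↔ pvConf x y := by
  constructor
  · rintro ⟨l, hl, hnl⟩
    rw [PySem.Set.mem_diff] at hl hnl
    exact ⟨l, hl.1, hnl.1⟩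
  · rintro ⟨l, hl, hnl⟩
    refine ⟨l, ?_, ?_⟩
    · rw [PySem.Set.mem_diff]
      refine ⟨hl, fun hlc => ?_⟩
      exact hy (-l) hnl (by simpa using hlc)
    · rw [PySem.Set.mem_diff]
      exact ⟨hnl, hx l hl⟩

theorem pvOk_map_diff (c : List Int) (s : List (List Int)) (h : ∀ x ∈ s, pvKeepB c x = true) :
    pvOk (s.map (fun x => PySem.Set.diff x c)) = pvOk s := by
  rw [Bool.eq_iff_iff, pvOk_iff, pvOk_iff, List.pairwise_map]
  apply List.Pairwise.iff_of_mem
  intro a b ha hb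
  exact not_congr
    (pvConf_diff c a b ((pvKeepB_iff c a).mp (h a ha)) ((pvKeepB_iff c b).mp (h b hb)))

theorem pvOk_append_singleton (s : List (List Int)) (c : List Int) :
    pvOk (s ++ [c]) = true ↔ pvOk s = true ∧ ∀ x ∈ s, pvKeepB c x = true := by
  rw [pvOk_iff, pvOk_iff, List.pairwise_append]
  simp only [List.pairwise_cons, List.mem_singleton]
  constructor
  · rintro ⟨h1, _, h3⟩
    refine ⟨h1, fun x hx => (pvKeepB_iff c x).mpr ?_⟩
    intro l hl hlc
    exact h3 x hx c rfl ⟨l, hl, hlc⟩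
  · rintro ⟨h1, h2⟩
    refine ⟨h1, ⟨⟨by simp, List.Pairwise.nil⟩, ?_⟩⟩
    rintro x hx b rfl ⟨l, hl, hlb⟩
    exact (pvKeepB_iff b x).mp (h2 x hx) l hl hlb

theorem pvUnion_split (s : List (List Int)) (c : List Int) (hc : c.Nodup) :
    (pvUnion (s ++ [c])).length
      = (pvUnion (s.map (fun x => PySem.Set.diff x c))).length + c.length := by
  rw [pvUnion_len, pvUnion_len]
  have hA : (s ++ [c]).flatten.toFinset = s.flatten.toFinset ∪ c.toFinset := by
    simp [List.flatten_append]
  have hB : (s.map (fun x => PySem.Set.diff x c)).flatten.toFinset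
      = s.flatten.toFinset \ c.toFinset := by
    ext y
    simp only [List.mem_toFinset, List.mem_flatten, Finset.mem_sdiff, List.mem_map]
    constructor
    · rintro ⟨x', ⟨x, hx, rfl⟩, hy⟩
      rw [PySem.Set.mem_diff] at hy
      exact ⟨⟨x, hx, hy.1⟩, hy.2⟩
    · rintro ⟨⟨x, hx, hy⟩, hyc⟩
      exact ⟨PySem.Set.diff x c, ⟨x, hx, rfl⟩, by rw [PySem.Set.mem_diff]; exact ⟨hy, hyc⟩⟩
  rw [hA, hB]
  rw [← List.toFinset_card_of_nodup hc]
  exact (Finset.card_sdiff_add_card _ _).symm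

theorem pvPoint (n : Int) (c : List Int) (hc : c.Nodup) (s : List (List Int)) :
    pvTerm n (s ++ [c])
      = (if s = [] then pvPow2 (n - (c.length : Int)) else 0)
        - (if s.all (pvKeepB c) then
            pvTerm (n - (c.length : Int)) (s.map (fun x => PySem.Set.diff x c)) else 0) := by
  by_cases hs : s = []
  · subst hs
    simp only [List.nil_append, List.all_nil, List.map_nil]
    have hu : (pvUnion [c]).length = c.length := by
      rw [pvUnion_len]
      simp [List.toFinset_card_of_nodup hc]
    have h0 : pvTerm (n - (c.length : Int)) ([] : List (List Int)) = 0 := by simp [pvTerm]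
    rw [h0, pvTerm, if_neg (by simp), if_pos (by simp [pvOk]), hu]
    simp
  · have hmapnil : (s.map (fun x => PySem.Set.diff x c)) ≠ [] := by simp [hs]
    rw [if_neg hs]
    by_cases hall : s.all (pvKeepB c) = true
    · have hkeep : ∀ x ∈ s, pvKeepB c x = true := by simpa [List.all_eq_true] using hall
      have hokapp : pvOk (s ++ [c]) = pvOk s := by
        rw [Bool.eq_iff_iff, pvOk_append_singleton]
        exact ⟨fun h => h.1, fun h => ⟨h, hkeep⟩⟩
      have hok2 : pvOk (s.map (fun x => PySem.Set.diff x c)) = pvOk s :=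
        pvOk_map_diff c s hkeep
      rw [if_pos hall]
      by_cases hok : pvOk s = true
      · have h1 : pvTerm n (s ++ [c])
            = (-1 : Int) ^ (s.length + 1 + 1)
              * pvPow2 (n - ((pvUnion (s ++ [c])).length : Int)) := by
          simp [pvTerm, hokapp, hok]
        have h2 : pvTerm (n - (c.length : Int)) (s.map (fun x => PySem.Set.diff x c))
            = (-1 : Int) ^ (s.length + 1)
              * pvPow2 (n - (c.length : Int)
                  - ((pvUnion (s.map (fun x => PySem.Set.diff x c))).length : Int)) := by
          simp [pvTerm, hok2, hok, hmapnil]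
        rw [h1, h2, pvUnion_split s c hc]
        have harg : n - (((pvUnion (s.map (fun x => PySem.Set.diff x c))).length + c.length : Nat) : Int)
            = n - (c.length : Int)
              - ((pvUnion (s.map (fun x => PySem.Set.diff x c))).length : Int) := by
          push_cast
          ring
        rw [harg, pow_succ]
        ring
      · have h1 : pvTerm n (s ++ [c]) = 0 := by simp [pvTerm, hokapp, hok]
        have h2 : pvTerm (n - (c.length : Int)) (s.map (fun x => PySem.Set.diff x c)) = 0 := by
          simp [pvTerm, hok2, hok]
        rw [h1, h2]
        ring
    · have hna : pvOk (s ++ [c]) ≠ true := by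
        intro htrue
        rw [pvOk_append_singleton] at htrue
        exact hall (List.all_eq_true.mpr htrue.2)
      rw [if_neg hall]
      simp [pvTerm, hna]

theorem pvFilterSum (c : List Int) :
    ∀ (M : List (List Int)) (F : List (List Int) → Int),
      ((pvSubsets (pvProj c M)).map F).sum
        = ((pvSubsets M).map (fun s =>
            if s.all (pvKeepB c) then F (s.map (fun x => PySem.Set.diff x c)) else 0)).sum := by
  intro M
  induction M using List.reverseRecOn with
  | nil => intro F; simp [pvProj, pvSubsets]
  | append_singleton M x ih =>
      intro F
      rw [pvSubsets_append M x, List.map_append, List.sum_append, List.map_map]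
      simp only [Function.comp_def]
      by_cases hx : pvKeepB c x = true
      · have hp : pvProj c (M ++ [x]) = pvProj c M ++ [PySem.Set.diff x c] := by
          simp [pvProj, List.filter_append, hx]
        rw [hp, pvSubsets_append (pvProj c M) (PySem.Set.diff x c), List.map_append,
          List.sum_append, List.map_map]
        simp only [Function.comp_def]
        rw [ih F, ih (fun t => F (t ++ [PySem.Set.diff x c]))]
        congr 1
        apply congrArg List.sum
        apply List.map_congr_left
        intro s _
        by_cases ha : s.all (pvKeepB c) = true
        · simp [List.all_append, ha, hx]
        · simp [List.all_append, ha]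
      · have hp : pvProj c (M ++ [x]) = pvProj c M := by
          simp [pvProj, List.filter_append, hx]
        rw [hp, ih F]
        have hz : ∀ y ∈ List.map (fun s => if (s ++ [x]).all (pvKeepB c) = true
            then F (List.map (fun z => PySem.Set.diff z c) (s ++ [x])) else 0) (pvSubsets M),
            y = (0 : Int) := by
          intro y hy
          obtain ⟨s, _, rfl⟩ := List.mem_map.mp hy
          simp [List.all_append, hx]
        rw [List.sum_eq_zero hz, add_zero]

theorem pvMain :
    ∀ (k : Nat) (L : List (List Int)) (n : Int), L.length = k → (∀ x ∈ L, x.Nodup) →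
      numA L n = ((pvSubsets L).map (pvTerm n)).sum := by
  intro k
  induction k using Nat.strong_induction_on with
  | _ k ih =>
    intro L n hk hnd
    rcases List.eq_nil_or_concat L with rfl | ⟨M, c, rfl⟩
    · rw [numA]
      simp [pvSubsets, pvTerm]
    · simp only [List.concat_eq_append] at hk hnd ⊢
      have hcn : c.Nodup := hnd c (by simp)
      by_cases hM : M = []
      · subst hM
        have hu : (pvUnion [c]).length = c.length := by
          rw [pvUnion_len]
          simp [List.toFinset_card_of_nodup hcn]
        rw [numA]
        simp [pvSubsets, pvTerm, pvOk, hu]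
      · have hMpos : 0 < M.length := List.length_pos_of_ne_nil hM
        have h1 : ¬((M ++ [c]).length = 1) := by simp; omega
        have h0 : ¬((M ++ [c]).length = 0) := by simp
        have hdl : (M ++ [c]).dropLast = M := by simp
        have hgl : (M ++ [c]).getLastD [] = c := by simp
        rw [numA]
        simp only [dif_neg h1, dif_neg h0, hdl, hgl]
        rw [pvNumfya_eq]
        have hM1 : M.length < k := by simp at hk; omega
        have hnd1 : ∀ x ∈ M, x.Nodup := fun x hx => hnd x (by simp [hx])
        have ihM := ih M.length hM1 M n rfl hnd1
        have hproj_len : (pvProj c M).length < k := by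
          have hf := List.length_filter_le (pvKeepB c) M
          simp only [pvProj, List.length_map]
          simp at hk
          omega
        have hndp : ∀ x ∈ pvProj c M, x.Nodup := by
          intro x hx
          obtain ⟨y, hy, rfl⟩ := List.mem_map.mp hx
          exact PySem.Set.nodup_diff y c (hnd1 y (List.mem_of_mem_filter hy))
        have ihP := ih (pvProj c M).length hproj_len (pvProj c M)
          (n - (c.length : Int)) rfl hndp
        rw [ihM, ihP]
        rw [pvSubsets_append M c, List.map_append, List.sum_append, List.map_map]
        simp only [Function.comp_def]
        have hfun : (fun s => pvTerm n (s ++ [c]))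
            = fun s => (if s = [] then pvPow2 (n - (c.length : Int)) else 0)
              - (if s.all (pvKeepB c) then
                  pvTerm (n - (c.length : Int)) (s.map (fun x => PySem.Set.diff x c)) else 0) :=
          funext (fun s => pvPoint n c hcn s)
        rw [hfun, pvSumMapSub, pvSumIfNil, pvSubsets_count_nil,
          ← pvFilterSum c M (pvTerm (n - (c.length : Int)))]
        push_cast
        ring

-- ===== VERDICT (by name: the statement is the Claim_ definition above) =====
theorem numeroalgunafalsa_spec : Claim_equal_numeroalgunafalsa := by
  intro lclau n _hdom _hpre
  unfold Spec_numeroalgunafalsa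
  rw [numeroalgunafalsa, numeroalgunafalsa_alt]
  rw [pvFoldEqSum n (pvSubsets (lclau.map fun c => PySem.Set.ofList c)) 0]
  rw [pvMain (lclau.map fun c => PySem.Set.ofList c).length _ n rfl ?_]
  · simp
  · intro x hx
    obtain ⟨y, _, rfl⟩ := List.mem_map.mp hx
    exact PySem.Set.nodup_ofList y
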